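-- pv_equiv track=rewrite | github.com/esfinkel/4701-music-generation-ai | music_helpers.py | get_duration_of_spine
-- ===== SOURCE A (Python) =====
-- def get_duration_of_spine(spine):
--   """Given **kern spine line, returns just the duration portion.
--   If there are multiple notes in the line, returns just the duration
--   portion of the first note. """
--   number = ""
--   for c in spine:
--     if c.isdigit():
--       number += c
--     if c == ".":
--       number += c
--     if c == " ":
--       return number
--   return number
-- ===== SOURCE B (Python) =====
-- def get_duration_of_spine(spine):
--     """Duration prefix of the first note: keep digits and dots from the
--     part of the line before the first space."""
--     prefix = spine.split(" ", 1)[0]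
--     return "".join(c for c in prefix if c.isdigit() or c == ".")
-- ===== Notes on version B (the rewrite author's own statement) =====
-- stated objective: simpler
-- what changed: B splits the line at the first space in one step and then filters digit/dot characters from that prefix, replacing A's single accumulate-and-early-return loop with two shaped passes (delimiter search, then filter).
import Mathlib
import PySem

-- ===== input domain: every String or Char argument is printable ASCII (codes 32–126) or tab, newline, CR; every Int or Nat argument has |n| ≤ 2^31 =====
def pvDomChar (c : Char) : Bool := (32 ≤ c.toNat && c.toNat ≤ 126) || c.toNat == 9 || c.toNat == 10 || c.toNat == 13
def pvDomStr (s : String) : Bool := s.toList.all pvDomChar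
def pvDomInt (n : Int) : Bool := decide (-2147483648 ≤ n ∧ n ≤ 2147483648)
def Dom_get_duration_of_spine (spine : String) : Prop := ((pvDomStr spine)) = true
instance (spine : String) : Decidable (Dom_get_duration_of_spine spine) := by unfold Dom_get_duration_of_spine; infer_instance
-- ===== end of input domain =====

-- B replaces A's single accumulate/early-return loop by take-before-space then filter (objective: simpler).
-- ===== PORT A =====
-- loop of A: fold over the chars with the accumulator `number`, returning at the first space.
-- Char.isDigit is exact for str.isdigit on the printable-ASCII domain.
def pvGoA : List Char → List Char → List Char
  | [], number => number
  | c :: rest, number =>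
    let n1 := if c.isDigit then number ++ [c] else number
    let n2 := if c = '.' then n1 ++ [c] else n1
    if c = ' ' then n2 else pvGoA rest n2

def get_duration_of_spine (spine : String) : String :=
  String.mk (pvGoA spine.toList [])

-- ===== PORT B =====
def get_duration_of_spine_alt (spine : String) : String :=
  let prefixChars := spine.toList.takeWhile (fun c => c ≠ ' ')   -- spine.split(" ", 1)[0]
  String.mk (prefixChars.filter (fun c => c.isDigit || c = '.'))

-- ===== PRECONDITION & SPEC =====
def Spec_get_duration_of_spine (spine : String) (out : String) : Prop := out = get_duration_of_spine_alt spine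
instance (spine : String) (out : String) : Decidable (Spec_get_duration_of_spine spine out) := by unfold Spec_get_duration_of_spine; infer_instance

-- ===== CLAIM (what is proved, stated in full; the proofs are below) =====
def Claim_equal_get_duration_of_spine : Prop := ∀ (spine : String), Dom_get_duration_of_spine spine → Spec_get_duration_of_spine spine (get_duration_of_spine spine)

-- ===== LEMMAS AND PROOFS =====

-- ===== VERDICT (by name: the statement is the Claim_ definition above) =====
-- loop invariant: A's loop returns its accumulator followed by B's filter of the pre-space prefix
theorem pvGoA_eq (l acc : List Char) :
    pvGoA l acc = acc ++ (l.takeWhile (fun c => c ≠ ' ')).filter (fun c => c.isDigit || c = '.') := by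
  induction l generalizing acc with
  | nil => simp [pvGoA]
  | cons c rest ih =>
    by_cases hs : c = ' '
    · subst hs; simp [pvGoA]
    · simp only [pvGoA, if_neg hs, ih]
      by_cases hd : c.isDigit <;> by_cases hp : c = '.' <;>
        simp_all [List.takeWhile]

theorem get_duration_of_spine_spec : Claim_equal_get_duration_of_spine := by
  intro spine _
  unfold Spec_get_duration_of_spine get_duration_of_spine get_duration_of_spine_alt
  rw [pvGoA_eq]
  simp
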